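-- pv_equiv track=rewrite | github.com/idlebear/target_grid | examples/latex.py | _format_row_labels
-- ===== SOURCE A (Python) =====
-- def _format_row_labels(label_set, previous_label_set, num_levels):
--     """Format row labels, showing only values that differ from the previous row."""
--     if previous_label_set is None:
--         # First row - show all labels
--         return " & ".join(label_set)
--
--     formatted_labels = []
--     higher_level_changed = False
--
--     for i in range(num_levels):
--         if i < len(label_set):
--             # Check if this level or any higher level changed
--             current_level_changed = label_set[i] != previous_label_set[i]
--
--             if current_level_changed or higher_level_changed:
--                 # Show label if this level changed OR if any higher-level category changed
--                 formatted_labels.append(label_set[i])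
--                 # Once a level changes, all subsequent levels should be shown
--                 higher_level_changed = True
--             else:
--                 # Same as previous row and no higher-level changes - show empty cell
--                 formatted_labels.append("")
--         else:
--             formatted_labels.append("")
--
--     return " & ".join(formatted_labels)
-- ===== SOURCE B (Python) =====
-- def _format_row_labels(label_set, previous_label_set, num_levels):
--     """Format row labels, showing only values that differ from the previous row."""
--     if previous_label_set is None:
--         return " & ".join(label_set)
--     m = min(num_levels, len(label_set))
--     # full in-order scan of the comparable prefix (one boolean per level)
--     changed = [label_set[i] != previous_label_set[i] for i in range(m)]
--     # first divergence point; everything from here on is shown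
--     k = changed.index(True) if True in changed else m
--     cells = [label_set[i] if k <= i < len(label_set) else "" for i in range(num_levels)]
--     return " & ".join(cells)
-- ===== Notes on version B (the rewrite author's own statement) =====
-- stated objective: simpler
-- what changed: Replaced A's single stateful loop carrying a 'higher level changed' flag by a three-step decomposition: build the per-level changed booleans, locate the first divergence index k, then emit cells directly as label_set[i] iff k <= i < len(label_set).
import Mathlib
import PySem

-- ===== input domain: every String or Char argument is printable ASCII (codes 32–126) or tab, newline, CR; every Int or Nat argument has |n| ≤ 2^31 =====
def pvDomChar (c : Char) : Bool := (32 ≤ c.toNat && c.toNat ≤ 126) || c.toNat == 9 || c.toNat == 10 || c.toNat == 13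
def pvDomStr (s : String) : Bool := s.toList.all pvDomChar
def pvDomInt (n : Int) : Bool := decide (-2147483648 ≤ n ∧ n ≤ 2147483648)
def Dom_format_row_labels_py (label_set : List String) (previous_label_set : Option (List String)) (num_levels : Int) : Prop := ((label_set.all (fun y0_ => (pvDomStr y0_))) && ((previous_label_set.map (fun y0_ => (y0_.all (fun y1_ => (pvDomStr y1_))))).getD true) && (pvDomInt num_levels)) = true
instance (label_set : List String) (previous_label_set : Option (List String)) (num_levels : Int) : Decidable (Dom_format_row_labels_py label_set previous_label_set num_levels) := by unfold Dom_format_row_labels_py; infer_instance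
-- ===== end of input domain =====

-- B simplifies A's stateful loop into a different decomposition: one scan for the first
-- divergence point, then a direct comprehension of the cells (objective: simpler/alternative).

-- ===== PORT A =====
-- literal transliteration of A's loop; the indexing pyGetD is in range under Pre_ below
def format_row_labels_py (label_set : List String) (previous_label_set : Option (List String)) (num_levels : Int) : String :=
  match previous_label_set with
  | none => PySem.Str.join " & " label_set
  | some prev =>
    let st := (PySem.List.pyRange 0 num_levels 1).foldl
      (fun (st : List String × Bool) i =>
        if i < (label_set.length : Int) then
          let cur := PySem.List.pyGetD label_set i ""
          let curChanged := cur != PySem.List.pyGetD prev i ""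
          if curChanged || st.2 then (st.1 ++ [cur], true)
          else (st.1 ++ [""], st.2)
        else (st.1 ++ [""], st.2))
      (([] : List String), false)
    PySem.Str.join " & " st.1

-- ===== PORT B =====
-- literal transliteration of Source B: changed list, first divergence index k, cell comprehension
def format_row_labels_py_alt (label_set : List String) (previous_label_set : Option (List String)) (num_levels : Int) : String :=
  match previous_label_set with
  | none => PySem.Str.join " & " label_set
  | some prev =>
    let m : Int := min num_levels (label_set.length : Int)
    let changed := (PySem.List.pyRange 0 m 1).map
      (fun i => PySem.List.pyGetD label_set i "" != PySem.List.pyGetD prev i "")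
    let k : Int := match PySem.List.index? changed true with
      | some j => (j : Int)
      | none => m
    let cells := (PySem.List.pyRange 0 num_levels 1).map
      (fun i => if decide (k ≤ i) && decide (i < (label_set.length : Int)) then PySem.List.pyGetD label_set i "" else "")
    PySem.Str.join " & " cells

-- ===== PRECONDITION & SPEC =====
-- Pre_ excludes exactly the inputs where Python A raises IndexError: a previous row shorter
-- than the compared prefix min(num_levels, len(label_set)) (B raises there too).
def Pre_format_row_labels_py (label_set : List String) (previous_label_set : Option (List String)) (num_levels : Int) : Prop :=
  (previous_label_set.elim true
    (fun prev => decide (min num_levels (label_set.length : Int) ≤ (prev.length : Int)))) = true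
instance (label_set : List String) (previous_label_set : Option (List String)) (num_levels : Int) : Decidable (Pre_format_row_labels_py label_set previous_label_set num_levels) := by unfold Pre_format_row_labels_py; infer_instance

def pvWitness_format_row_labels_py : List String × Option (List String) × Int := (["a", "b"], some ["a", "c"], 2)

def Spec_format_row_labels_py (label_set : List String) (previous_label_set : Option (List String)) (num_levels : Int) (out : String) : Prop := out = format_row_labels_py_alt label_set previous_label_set num_levels
instance (label_set : List String) (previous_label_set : Option (List String)) (num_levels : Int) (out : String) : Decidable (Spec_format_row_labels_py label_set previous_label_set num_levels out) := by unfold Spec_format_row_labels_py; infer_instance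

-- ===== CLAIM (what is proved, stated in full; the proofs are below) =====
def Claim_equal_format_row_labels_py : Prop := ∀ (label_set : List String) (previous_label_set : Option (List String)) (num_levels : Int), Dom_format_row_labels_py label_set previous_label_set num_levels → Pre_format_row_labels_py label_set previous_label_set num_levels → Spec_format_row_labels_py label_set previous_label_set num_levels (format_row_labels_py label_set previous_label_set num_levels)

-- ===== LEMMAS AND PROOFS =====

-- loop invariant: A's fold over range(n) produces B's cells over range(n) and the flag
-- "first divergence k already passed (and one exists: k < m)"
theorem pv_loop_inv (ls prev : List String) (NL m k : Int)
    (hm : m = min NL (ls.length : Int))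
    (hk0 : 0 ≤ k) (hk1 : k ≤ m)
    (hk2 : ∀ i : Int, 0 ≤ i → i < k →
      (PySem.List.pyGetD ls i "" != PySem.List.pyGetD prev i "") = false)
    (hk3 : k < m → (PySem.List.pyGetD ls k "" != PySem.List.pyGetD prev k "") = true) :
    ∀ n : Nat, (n : Int) ≤ NL →
      (PySem.List.pyRange 0 (n : Int) 1).foldl
        (fun (st : List String × Bool) i =>
          if i < (ls.length : Int) then
            let cur := PySem.List.pyGetD ls i ""
            let curChanged := cur != PySem.List.pyGetD prev i ""
            if curChanged || st.2 then (st.1 ++ [cur], true)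
            else (st.1 ++ [""], st.2)
          else (st.1 ++ [""], st.2))
        (([] : List String), false)
      = ((PySem.List.pyRange 0 (n : Int) 1).map
          (fun i => if decide (k ≤ i) && decide (i < (ls.length : Int)) then PySem.List.pyGetD ls i "" else ""),
         decide ((k < (n : Int)) ∧ k < m)) := by
  intro n
  induction n with
  | zero =>
    intro _
    rw [PySem.List.pyRange_one_eq_nil (by omega)]
    simp
    omega
  | succ n ih =>
    intro hle
    have hn : (n : Int) ≤ NL := by push_cast at hle ⊢; omega
    have hcast : ((n + 1 : Nat) : Int) = (n : Int) + 1 := by push_cast; ring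
    rw [hcast, PySem.List.pyRange_one_succ_right (by omega), List.foldl_append, List.map_append,
      ih hn]
    simp only [List.foldl_cons, List.foldl_nil, List.map_cons, List.map_nil]
    have hmlen : m ≤ (ls.length : Int) := by omega
    by_cases hlen : (n : Int) < (ls.length : Int)
    · -- n < len; since n < NL also n < m
      have hnm : (n : Int) < m := by
        have : (n : Int) < NL := by push_cast at hle; omega
        omega
      rw [if_pos hlen]
      by_cases hkn : k ≤ (n : Int)
      · -- shown: ch n || flag = true
        have hshow : ((PySem.List.pyGetD ls (n : Int) "" != PySem.List.pyGetD prev (n : Int) "") ||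
            decide ((k < (n : Int)) ∧ k < m)) = true := by
          rcases lt_or_eq_of_le hkn with h | h
          · simp only [Bool.or_eq_true, decide_eq_true_eq]
            right; exact ⟨h, by omega⟩
          · subst h; rw [hk3 hnm]; simp
        simp only [hshow, if_true, Prod.mk.injEq]
        refine ⟨?_, ?_⟩
        · congr 1
          rw [if_pos (by simp only [Bool.and_eq_true, decide_eq_true_eq]; exact ⟨hkn, hlen⟩)]
        · symm; simp only [decide_eq_true_eq]; omega
      · -- hidden: ch n = false, flag false
        have hchn : (PySem.List.pyGetD ls (n : Int) "" != PySem.List.pyGetD prev (n : Int) "") = false :=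
          hk2 _ (by omega) (by omega)
        have hflag : decide ((k < (n : Int)) ∧ k < m) = false := by
          simp only [decide_eq_false_iff_not]; omega
        simp only [hchn, hflag, Bool.or_self, Bool.false_eq_true, if_false, Prod.mk.injEq]
        refine ⟨?_, ?_⟩
        · congr 1
          rw [if_neg (by simp only [Bool.and_eq_true, decide_eq_true_eq]; omega)]
        · symm; simp only [decide_eq_false_iff_not]; omega
    · -- len ≤ n: empty cell, flag unchanged
      rw [if_neg hlen]
      simp only [Prod.mk.injEq]
      refine ⟨?_, ?_⟩
      · congr 1
        rw [if_neg (by simp only [Bool.and_eq_true, decide_eq_true_eq]; omega)]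
      · simp only [decide_eq_decide]
        omega

theorem format_row_labels_py_eq_alt (label_set : List String)
    (previous_label_set : Option (List String)) (num_levels : Int) :
    format_row_labels_py label_set previous_label_set num_levels
      = format_row_labels_py_alt label_set previous_label_set num_levels := by
  cases previous_label_set with
  | none => rfl
  | some prev =>
    simp only [format_row_labels_py, format_row_labels_py_alt]
    by_cases hneg : num_levels ≤ 0
    · rw [PySem.List.pyRange_one_eq_nil hneg]
      simp
    · push Not at hneg
      have hnl : num_levels = ((num_levels.toNat : Nat) : Int) := by omega
      have hm0 : (0 : Int) ≤ min num_levels (label_set.length : Int) := by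
        simp only [le_min_iff]; constructor <;> omega
      have hlenc : ((PySem.List.pyRange 0 (min num_levels (label_set.length : Int)) 1).map
          (fun i => PySem.List.pyGetD label_set i "" != PySem.List.pyGetD prev i "")).length
          = (min num_levels (label_set.length : Int)).toNat := by
        simp [PySem.List.length_pyRange_one]
      rcases hidx : PySem.List.index?
          ((PySem.List.pyRange 0 (min num_levels (label_set.length : Int)) 1).map
            (fun i => PySem.List.pyGetD label_set i "" != PySem.List.pyGetD prev i "")) true
        with _ | j
      · -- no change found: k = m
        have hnot : true ∉ ((PySem.List.pyRange 0 (min num_levels (label_set.length : Int)) 1).map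
            (fun i => PySem.List.pyGetD label_set i "" != PySem.List.pyGetD prev i "")) :=
          (PySem.List.index?_eq_none_iff _ _).mp hidx
        have hfold := pv_loop_inv label_set prev num_levels (min num_levels (label_set.length : Int))
          (min num_levels (label_set.length : Int)) rfl hm0 le_rfl ?pref (by omega)
          num_levels.toNat (by omega)
        case pref =>
          intro i h0 hik
          by_contra hne
          have hchi : (PySem.List.pyGetD label_set i "" != PySem.List.pyGetD prev i "") = true := by
            cases h : (PySem.List.pyGetD label_set i "" != PySem.List.pyGetD prev i "")
            · exact absurd h hne
            · rfl
          exact hnot (hchi ▸ List.mem_map_of_mem (by rw [PySem.List.mem_pyRange_one]; omega))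
        rw [show ((num_levels.toNat : Nat) : Int) = num_levels from by omega] at hfold
        rw [hfold]
      · -- first change at index j: k = j
        obtain ⟨hjlt, hjtrue, hjmin⟩ := PySem.List.getElem_of_index?_eq_some hidx
        have hjm : (j : Int) < min num_levels (label_set.length : Int) := by
          rw [hlenc] at hjlt; omega
        have hel : ∀ (l : Nat) (hl : l < ((PySem.List.pyRange 0 (min num_levels (label_set.length : Int)) 1).map
            (fun i => PySem.List.pyGetD label_set i "" != PySem.List.pyGetD prev i "")).length),
            ((PySem.List.pyRange 0 (min num_levels (label_set.length : Int)) 1).map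
              (fun i => PySem.List.pyGetD label_set i "" != PySem.List.pyGetD prev i ""))[l]'hl
            = (PySem.List.pyGetD label_set (l : Int) "" != PySem.List.pyGetD prev (l : Int) "") := by
          intro l hl
          have hlm : l < (min num_levels (label_set.length : Int)).toNat := by
            rw [hlenc] at hl; exact hl
          simp only [List.getElem_map]
          rw [PySem.List.getElem_pyRange_one, zero_add]
        have hfold := pv_loop_inv label_set prev num_levels (min num_levels (label_set.length : Int))
          (j : Int) rfl (by omega) (by omega) ?pref ?prefk num_levels.toNat (by omega)
        case pref =>
          intro i h0 hik
          have hit : i.toNat < j := by omega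
          have hne := hjmin i.toNat hit
          have := hel i.toNat (by omega)
          have hcast : ((i.toNat : Nat) : Int) = i := by omega
          rw [hcast] at this
          rw [this] at hne
          cases h : (PySem.List.pyGetD label_set i "" != PySem.List.pyGetD prev i "")
          · rfl
          · exact absurd h hne
        case prefk =>
          intro _
          have := hel j hjlt
          rw [this] at hjtrue
          exact hjtrue
        rw [show ((num_levels.toNat : Nat) : Int) = num_levels from by omega] at hfold
        rw [hfold]

-- ===== VERDICT (by name: the statement is the Claim_ definition above) =====
theorem format_row_labels_py_spec : Claim_equal_format_row_labels_py := by
  intro label_set previous_label_set num_levels _ _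
  unfold Spec_format_row_labels_py
  exact format_row_labels_py_eq_alt label_set previous_label_set num_levels
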